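-- pv_equiv track=rewrite | github.com/RodrigoGuerraCortes/proyecto-oraciones | generator/v2/content/segmentation_legacy.py | _buscar_punto_corte
-- ===== SOURCE A (Python) =====
-- def _buscar_punto_corte(
--     lineas: list[str],
--     ideal: int,
--     tolerancia: int = 2,
-- ) -> int:
--     """
--     Busca un punto de corte natural alrededor del índice ideal.
--     Considera +/- tolerancia líneas.
--     Devuelve el índice de corte (exclusivo).
--     """
--
--     if ideal >= len(lineas):
--         return len(lineas)
--
--     prioridades = [
--         ".",   # cierre fuerte
--         ":",   # introducción / pausa larga
--         ";",   # pausa media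
--         ",",   # pausa débil (último recurso)
--     ]
--
--     inicio = max(0, ideal - tolerancia)
--     fin = min(len(lineas) - 1, ideal + tolerancia)
--
--     # 1) Buscar por prioridad de signos
--     for signo in prioridades:
--         for i in range(inicio, fin + 1):
--             if lineas[i].strip().endswith(signo):
--                 return i + 1
--
--     # 2) Fallback: corte mecánico
--     return ideal
-- ===== SOURCE B (Python) =====
-- def _buscar_punto_corte(
--     lineas: list[str],
--     ideal: int,
--     tolerancia: int = 2,
-- ) -> int:
--     """Single pass keeping the best (lowest-rank, earliest) cut candidate."""
--     if ideal >= len(lineas):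
--         return len(lineas)
--
--     prioridades = [
--         ".",
--         ":",
--         ";",
--         ",",
--     ]
--
--     inicio = max(0, ideal - tolerancia)
--     fin = min(len(lineas) - 1, ideal + tolerancia)
--
--     best_rank = len(prioridades)
--     best_i = None
--     for i in range(inicio, fin + 1):
--         s = lineas[i].strip()
--         rank = len(prioridades)
--         for k, signo in enumerate(prioridades):
--             if s.endswith(signo):
--                 rank = k
--                 break
--         if rank < best_rank:
--             best_rank = rank
--             best_i = i
--
--     return best_i + 1 if best_i is not None else ideal
-- ===== Notes on version B (the rewrite author's own statement) =====
-- stated objective: alternative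
-- what changed: Replaced the priority-outer/position-inner double scan (up to 4 passes over the window) with a single pass over the window that computes each line's terminal-punctuation rank and keeps a running best (strictly smaller rank wins, earliest position kept).
import Mathlib
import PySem

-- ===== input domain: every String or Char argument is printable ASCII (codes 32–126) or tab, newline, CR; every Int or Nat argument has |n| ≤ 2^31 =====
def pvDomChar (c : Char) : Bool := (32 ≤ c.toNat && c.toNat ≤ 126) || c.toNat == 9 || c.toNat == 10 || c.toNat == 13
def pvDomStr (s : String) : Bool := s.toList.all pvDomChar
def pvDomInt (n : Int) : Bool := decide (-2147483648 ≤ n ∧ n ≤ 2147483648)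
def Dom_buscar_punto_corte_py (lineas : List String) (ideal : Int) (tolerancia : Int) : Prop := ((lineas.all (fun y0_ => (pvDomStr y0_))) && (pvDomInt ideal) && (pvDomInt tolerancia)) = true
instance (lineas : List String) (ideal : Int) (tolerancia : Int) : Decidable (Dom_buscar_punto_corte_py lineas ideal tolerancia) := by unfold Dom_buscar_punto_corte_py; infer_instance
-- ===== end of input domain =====

-- B replaces A's priority-outer/position-inner double scan with one pass over the
-- window keeping a running best (rank, position); same result, different decomposition.

-- ===== PORT A =====
-- the `prioridades` list of A (and of B)
def pvPrioridades : List String := [".", ":", ";", ","]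

-- A's inner loop: first index in `idxs` whose stripped line ends with `signo`
def pvInnerA (lineas : List String) (signo : String) : List Int → Option Int
  | [] => none
  | i :: rest =>
      if PySem.Str.endswith (PySem.Str.strip (PySem.List.pyGetD lineas i "")) signo then some i
      else pvInnerA lineas signo rest

-- A's outer loop over the priorities
def pvOuterA (lineas : List String) (idxs : List Int) : List String → Option Int
  | [] => none
  | signo :: rest =>
      match pvInnerA lineas signo idxs with
      | some i => some i
      | none => pvOuterA lineas idxs rest

def buscar_punto_corte_py (lineas : List String) (ideal : Int) (tolerancia : Int) : Int :=
  if ideal ≥ (lineas.length : Int) then (lineas.length : Int)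
  else
    let inicio := max 0 (ideal - tolerancia)
    let fin := min ((lineas.length : Int) - 1) (ideal + tolerancia)
    match pvOuterA lineas (PySem.List.pyRange inicio (fin + 1) 1) pvPrioridades with
    | some i => i + 1
    | none => ideal

-- ===== PORT B =====
-- B's inner loop: rank of the line = enumerate index of the first matching signo, else 4
def pvRankB (s : String) : List String → Nat → Nat
  | [], k => k
  | signo :: rest, k => if PySem.Str.endswith s signo then k else pvRankB s rest (k + 1)

-- B's single pass, carrying (best_rank, best_i)
def pvFoldB (lineas : List String) : List Int → Nat × Option Int → Nat × Option Int
  | [], st => st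
  | i :: rest, (b, bi) =>
      let r := pvRankB (PySem.Str.strip (PySem.List.pyGetD lineas i "")) pvPrioridades 0
      pvFoldB lineas rest (if r < b then (r, some i) else (b, bi))

def buscar_punto_corte_py_alt (lineas : List String) (ideal : Int) (tolerancia : Int) : Int :=
  if ideal ≥ (lineas.length : Int) then (lineas.length : Int)
  else
    let inicio := max 0 (ideal - tolerancia)
    let fin := min ((lineas.length : Int) - 1) (ideal + tolerancia)
    match (pvFoldB lineas (PySem.List.pyRange inicio (fin + 1) 1) (pvPrioridades.length, none)).2 with
    | some i => i + 1
    | none => ideal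

-- ===== PRECONDITION & SPEC =====
def Spec_buscar_punto_corte_py (lineas : List String) (ideal : Int) (tolerancia : Int) (out : Int) : Prop := out = buscar_punto_corte_py_alt lineas ideal tolerancia
instance (lineas : List String) (ideal : Int) (tolerancia : Int) (out : Int) : Decidable (Spec_buscar_punto_corte_py lineas ideal tolerancia out) := by unfold Spec_buscar_punto_corte_py; infer_instance

-- ===== CLAIM (what is proved, stated in full; the proofs are below) =====
def Claim_equal_buscar_punto_corte_py : Prop := ∀ (lineas : List String) (ideal : Int) (tolerancia : Int), Dom_buscar_punto_corte_py lineas ideal tolerancia → Spec_buscar_punto_corte_py lineas ideal tolerancia (buscar_punto_corte_py lineas ideal tolerancia)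

-- ===== LEMMAS AND PROOFS =====

-- the rank of line `i` as B computes it
def pvRk (lineas : List String) (i : Int) : Nat :=
  pvRankB (PySem.Str.strip (PySem.List.pyGetD lineas i "")) pvPrioridades 0

-- minimum rank over a window, capped at 4
def pvMinR (lineas : List String) : List Int → Nat
  | [] => 4
  | i :: rest => min (pvRk lineas i) (pvMinR lineas rest)

-- the k-th endswith test
def pvTest (lineas : List String) (k : Nat) (i : Int) : Bool :=
  PySem.Str.endswith (PySem.Str.strip (PySem.List.pyGetD lineas i "")) (pvPrioridades.getD k "")

lemma pvRk_eq (lineas : List String) (i : Int) :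
    pvRk lineas i =
      if pvTest lineas 0 i then 0 else if pvTest lineas 1 i then 1
      else if pvTest lineas 2 i then 2 else if pvTest lineas 3 i then 3 else 4 := by
  simp [pvRk, pvRankB, pvPrioridades, pvTest]

lemma pvRk_le_four (lineas : List String) (i : Int) : pvRk lineas i ≤ 4 := by
  rw [pvRk_eq]; split_ifs <;> omega

lemma pvMinR_le (lineas : List String) (idxs : List Int) (i : Int) (h : i ∈ idxs) :
    pvMinR lineas idxs ≤ pvRk lineas i := by
  induction idxs with
  | nil => cases h
  | cons j rest ih =>
      rcases List.mem_cons.mp h with h | h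
      · subst h; simp [pvMinR]
      · have := ih h; simp [pvMinR]; omega

lemma pvMinR_le_four (lineas : List String) (idxs : List Int) : pvMinR lineas idxs ≤ 4 := by
  induction idxs with
  | nil => simp [pvMinR]
  | cons j rest ih => simp [pvMinR]; omega

-- test k i holds iff rank i = k, provided no smaller rank occurs (k ≤ rk i)
lemma test_iff_rk (lineas : List String) (k : Nat) (i : Int) (hk : k < 4)
    (hge : k ≤ pvRk lineas i) : pvTest lineas k i = (pvRk lineas i == k) := by
  rw [pvRk_eq] at *
  interval_cases k <;> split_ifs at * <;> simp_all

-- if the k-th test fires, the rank is at most k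
lemma rk_le_of_test (lineas : List String) (k : Nat) (i : Int) (hk : k < 4)
    (h : pvTest lineas k i = true) : pvRk lineas i ≤ k := by
  rw [pvRk_eq]
  interval_cases k <;> split_ifs <;> simp_all

-- test k i is false whenever k < rk i
lemma test_false_of_lt (lineas : List String) (k : Nat) (i : Int)
    (h : k < pvRk lineas i) : pvTest lineas k i = false := by
  have hk : k < 4 := by have := pvRk_le_four lineas i; omega
  cases hv : pvTest lineas k i
  · rfl
  · have := rk_le_of_test lineas k i hk hv; omega

-- A's inner loop is List.find? on the k-th test
lemma innerA_eq_find (lineas : List String) (k : Nat) (idxs : List Int) :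
    pvInnerA lineas (pvPrioridades.getD k "") idxs = idxs.find? (fun i => pvTest lineas k i) := by
  induction idxs with
  | nil => rfl
  | cons j rest ih =>
      simp only [pvInnerA, pvTest, List.find?]
      split_ifs with h <;> simp_all [pvTest]

lemma find?_congr_mem {α : Type} (p q : α → Bool) (l : List α)
    (h : ∀ a ∈ l, p a = q a) : l.find? p = l.find? q := by
  induction l with
  | nil => rfl
  | cons x rest ih =>
      have hx := h x (by simp)
      simp only [List.find?, hx]
      cases q x
      · exact ih (fun a ha => h a (by simp [ha]))
      · rfl

-- find? of a too-small test is none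
lemma find_test_none (lineas : List String) (k : Nat) (idxs : List Int)
    (h : k < pvMinR lineas idxs) : idxs.find? (fun i => pvTest lineas k i) = none := by
  rw [List.find?_eq_none]
  intro i hi
  have := pvMinR_le lineas idxs i hi
  simp [test_false_of_lt lineas k i (by omega)]

-- find? of the minimal test equals find? on the rank predicate
lemma find_test_min (lineas : List String) (idxs : List Int)
    (h : pvMinR lineas idxs < 4) :
    idxs.find? (fun i => pvTest lineas (pvMinR lineas idxs) i) =
      idxs.find? (fun i => pvRk lineas i == pvMinR lineas idxs) := by
  apply find?_congr_mem
  intro i hi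
  exact test_iff_rk lineas _ i h (pvMinR_le lineas idxs i hi)

-- some index realises the minimum when it is < 4
lemma find_min_isSome (lineas : List String) (idxs : List Int)
    (h : pvMinR lineas idxs < 4) :
    (idxs.find? (fun i => pvRk lineas i == pvMinR lineas idxs)).isSome := by
  induction idxs with
  | nil => simp [pvMinR] at h
  | cons j rest ih =>
      simp only [pvMinR] at h
      by_cases hj : pvRk lineas j ≤ pvMinR lineas rest
      · have : pvMinR lineas (j :: rest) = pvRk lineas j := by simp [pvMinR]; omega
        rw [this]
        simp [List.find?]
      · have hm : pvMinR lineas (j :: rest) = pvMinR lineas rest := by simp [pvMinR]; omega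
        rw [hm]
        have hne : (pvRk lineas j == pvMinR lineas rest) = false := by
          simp; omega
        simp only [List.find?, hne]
        exact ih (by omega)

-- characterisation of A's outer loop
lemma outerA_char (lineas : List String) (idxs : List Int) :
    pvOuterA lineas idxs pvPrioridades =
      if pvMinR lineas idxs < 4 then
        idxs.find? (fun i => pvRk lineas i == pvMinR lineas idxs)
      else none := by
  have e0 : pvInnerA lineas "." idxs = idxs.find? (fun i => pvTest lineas 0 i) :=
    innerA_eq_find lineas 0 idxs
  have e1 : pvInnerA lineas ":" idxs = idxs.find? (fun i => pvTest lineas 1 i) :=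
    innerA_eq_find lineas 1 idxs
  have e2 : pvInnerA lineas ";" idxs = idxs.find? (fun i => pvTest lineas 2 i) :=
    innerA_eq_find lineas 2 idxs
  have e3 : pvInnerA lineas "," idxs = idxs.find? (fun i => pvTest lineas 3 i) :=
    innerA_eq_find lineas 3 idxs
  have hle := pvMinR_le_four lineas idxs
  have hc : pvMinR lineas idxs = 0 ∨ pvMinR lineas idxs = 1 ∨ pvMinR lineas idxs = 2 ∨
      pvMinR lineas idxs = 3 ∨ pvMinR lineas idxs = 4 := by omega
  rcases hc with hm | hm | hm | hm | hm
  · obtain ⟨v, hv⟩ := Option.isSome_iff_exists.mp (find_min_isSome lineas idxs (by omega))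
    have s0 := find_test_min lineas idxs (by omega)
    rw [hm] at s0
    rw [hm] at hv
    simp only [pvOuterA, pvPrioridades, e0, s0, hm]
    simp [hv]
  · obtain ⟨v, hv⟩ := Option.isSome_iff_exists.mp (find_min_isSome lineas idxs (by omega))
    have n0 := find_test_none lineas 0 idxs (by omega)
    have s1 := find_test_min lineas idxs (by omega)
    rw [hm] at s1
    rw [hm] at hv
    simp only [pvOuterA, pvPrioridades, e0, e1, n0, s1, hm]
    simp [hv]
  · obtain ⟨v, hv⟩ := Option.isSome_iff_exists.mp (find_min_isSome lineas idxs (by omega))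
    have n0 := find_test_none lineas 0 idxs (by omega)
    have n1 := find_test_none lineas 1 idxs (by omega)
    have s2 := find_test_min lineas idxs (by omega)
    rw [hm] at s2
    rw [hm] at hv
    simp only [pvOuterA, pvPrioridades, e0, e1, e2, n0, n1, s2, hm]
    simp [hv]
  · obtain ⟨v, hv⟩ := Option.isSome_iff_exists.mp (find_min_isSome lineas idxs (by omega))
    have n0 := find_test_none lineas 0 idxs (by omega)
    have n1 := find_test_none lineas 1 idxs (by omega)
    have n2 := find_test_none lineas 2 idxs (by omega)
    have s3 := find_test_min lineas idxs (by omega)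
    rw [hm] at s3
    rw [hm] at hv
    simp only [pvOuterA, pvPrioridades, e0, e1, e2, e3, n0, n1, n2, s3, hm]
    simp [hv]
  · have n0 := find_test_none lineas 0 idxs (by omega)
    have n1 := find_test_none lineas 1 idxs (by omega)
    have n2 := find_test_none lineas 2 idxs (by omega)
    have n3 := find_test_none lineas 3 idxs (by omega)
    simp only [pvOuterA, pvPrioridades, e0, e1, e2, e3, n0, n1, n2, n3, hm]
    simp

-- characterisation of B's fold
lemma foldB_char (lineas : List String) (idxs : List Int) (b : Nat) (bi : Option Int) (hb : b ≤ 4) :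
    pvFoldB lineas idxs (b, bi) =
      if pvMinR lineas idxs < b then
        (pvMinR lineas idxs, idxs.find? (fun i => pvRk lineas i == pvMinR lineas idxs))
      else (b, bi) := by
  induction idxs generalizing b bi with
  | nil =>
      have : ¬ pvMinR lineas [] < b := by simp [pvMinR]; omega
      simp [pvFoldB, this]
  | cons j rest ih =>
      have hr : pvRankB (PySem.Str.strip (PySem.List.pyGetD lineas j "")) pvPrioridades 0
          = pvRk lineas j := rfl
      simp only [pvFoldB, hr, pvMinR]
      have ihj := ih (pvRk lineas j) (some j) (pvRk_le_four lineas j)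
      have ihb := ih b bi hb
      by_cases hj : pvRk lineas j < b
      · simp only [if_pos hj, ihj]
        by_cases hrest : pvMinR lineas rest < pvRk lineas j
        · have hmin : min (pvRk lineas j) (pvMinR lineas rest) = pvMinR lineas rest := by omega
          rw [if_pos hrest, hmin, if_pos (by omega)]
          have hne : (pvRk lineas j == pvMinR lineas rest) = false := by simp; omega
          simp [List.find?, hne]
        · have hmin : min (pvRk lineas j) (pvMinR lineas rest) = pvRk lineas j := by omega
          rw [if_neg hrest, hmin, if_pos hj]
          have heq : (pvRk lineas j == pvRk lineas j) = true := by simp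
          simp [List.find?]
      · simp only [if_neg hj, ihb]
        by_cases hrest : pvMinR lineas rest < b
        · have hmin : min (pvRk lineas j) (pvMinR lineas rest) = pvMinR lineas rest := by omega
          rw [if_pos hrest, hmin, if_pos (by omega)]
          have hne : (pvRk lineas j == pvMinR lineas rest) = false := by simp; omega
          simp [List.find?, hne]
        · have : ¬ min (pvRk lineas j) (pvMinR lineas rest) < b := by omega
          rw [if_neg hrest, if_neg this]

-- the two loops agree on any window
lemma loops_agree (lineas : List String) (idxs : List Int) :
    pvOuterA lineas idxs pvPrioridades =
      (pvFoldB lineas idxs (pvPrioridades.length, none)).2 := by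
  have hlen : pvPrioridades.length = 4 := rfl
  rw [outerA_char, hlen, foldB_char lineas idxs 4 none (by omega)]
  split_ifs <;> rfl

-- ===== VERDICT (by name: the statement is the Claim_ definition above) =====
theorem buscar_punto_corte_py_spec : Claim_equal_buscar_punto_corte_py := by
  intro lineas ideal tolerancia _
  unfold Spec_buscar_punto_corte_py buscar_punto_corte_py buscar_punto_corte_py_alt
  by_cases h : ideal ≥ (lineas.length : Int)
  · simp [h]
  · simp only [if_neg h]
    rw [loops_agree]
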